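-- pv_equiv track=rewrite | github.com/Ammoniya/research | generate_signatures.py | _generate_abstract_pattern
-- ===== SOURCE A (Python) =====
-- from typing import Dict, List, Optional, Tuple
-- from collections import defaultdict
--
-- def _generate_abstract_pattern(patterns: List[str], vuln_type: str) -> str:
--     """Generate abstract signature pattern"""
--     # Categorize patterns
--     categories = defaultdict(list)
--     for pattern in patterns:
--         category, func = pattern.split(':', 1) if ':' in pattern else ('UNKNOWN', pattern)
--         categories[category].append(func)
--
--     # Build abstract pattern
--     signature_parts = []
--     for category, funcs in sorted(categories.items()):
--         signature_parts.append(f"{category}[{','.join(sorted(set(funcs)))}]")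
--
--     return f"{vuln_type}::{'|'.join(signature_parts)}"
-- ===== SOURCE B (Python) =====
-- def _generate_abstract_pattern(patterns, vuln_type):
--     """Generate abstract signature pattern (no dict index: sorted distinct categories + per-category filter)"""
--     pairs = [tuple(p.split(':', 1)) if ':' in p else ('UNKNOWN', p) for p in patterns]
--     parts = [
--         "{}[{}]".format(c, ','.join(sorted({f for cc, f in pairs if cc == c})))
--         for c in sorted({c for c, _ in pairs})
--     ]
--     return "{}::{}".format(vuln_type, '|'.join(parts))
-- ===== Notes on version B (the rewrite author's own statement) =====
-- stated objective: alternative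
-- what changed: Replaces the defaultdict build-index-then-sort-items pass with a flat parse into (category,func) pairs, a sorted deduplicated category list, and a per-category filter over the pairs (no dict at all).
import Mathlib
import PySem

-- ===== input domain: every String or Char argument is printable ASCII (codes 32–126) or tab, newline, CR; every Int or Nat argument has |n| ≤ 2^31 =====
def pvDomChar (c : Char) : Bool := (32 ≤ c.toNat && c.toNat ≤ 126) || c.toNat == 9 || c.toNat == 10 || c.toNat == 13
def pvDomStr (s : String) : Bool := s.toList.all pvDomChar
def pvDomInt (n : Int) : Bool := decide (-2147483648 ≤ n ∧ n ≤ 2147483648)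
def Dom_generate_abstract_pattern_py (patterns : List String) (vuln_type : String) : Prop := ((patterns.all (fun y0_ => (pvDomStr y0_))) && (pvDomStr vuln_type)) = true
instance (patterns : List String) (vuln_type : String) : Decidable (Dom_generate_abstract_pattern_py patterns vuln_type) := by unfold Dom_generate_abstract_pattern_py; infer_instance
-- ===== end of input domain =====

-- ===== PORT A =====
-- One honest line: B drops the defaultdict index and instead sorts the deduplicated
-- category list and filters the parsed (category, func) pairs per category (alternative
-- decomposition, same results).

-- shared parse step: both Pythons contain the same expression
-- "p.split(':', 1) if ':' in p else ('UNKNOWN', p)"; exact via PySem.Str.isIn / splitMax?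
-- (the getD defaults only totalize: with ':' in p, split(':',1) returns exactly two pieces)
def pvParse (p : String) : String × String :=
  if PySem.Str.isIn ":" p then
    let parts := (PySem.Str.splitMax? p ":" 1).getD []
    (parts.getD 0 "", parts.getD 1 "")
  else ("UNKNOWN", p)

-- literal port of A: build the defaultdict(list), sort its items (keys are distinct,
-- so Python's tuple comparison in sorted(categories.items()) reduces to the key), format
def generate_abstract_pattern_py (patterns : List String) (vuln_type : String) : String :=
  let categories : PySem.Dict String (List String) :=
    patterns.foldl (fun d p =>
      let cf := pvParse p
      d.modify cf.1 [] (fun l => l ++ [cf.2])) PySem.Dict.empty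
  let signature_parts :=
    (PySem.List.sorted categories.items (fun q => q.1) false).foldl (fun acc q =>
      acc ++ [PySem.Str.join "" [q.1, "[",
        PySem.Str.join "," (PySem.List.sorted (PySem.Set.ofList q.2) (fun x => x) false), "]"]]) []
  PySem.Str.join "" [vuln_type, "::", PySem.Str.join "|" signature_parts]

-- ===== PORT B =====
def generate_abstract_pattern_py_alt (patterns : List String) (vuln_type : String) : String :=
  let pairs := patterns.map pvParse
  let parts :=
    (PySem.List.sorted (PySem.Set.ofList (pairs.map (fun q => q.1))) (fun x => x) false).map
      (fun c => PySem.Str.join "" [c, "[",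
        PySem.Str.join "," (PySem.List.sorted
          (PySem.Set.ofList ((pairs.filter (fun q => q.1 == c)).map (fun q => q.2)))
          (fun x => x) false), "]"])
  PySem.Str.join "" [vuln_type, "::", PySem.Str.join "|" parts]

-- ===== PRECONDITION & SPEC =====
def Spec_generate_abstract_pattern_py (patterns : List String) (vuln_type : String) (out : String) : Prop := out = generate_abstract_pattern_py_alt patterns vuln_type
instance (patterns : List String) (vuln_type : String) (out : String) : Decidable (Spec_generate_abstract_pattern_py patterns vuln_type out) := by unfold Spec_generate_abstract_pattern_py; infer_instance

-- ===== CLAIM (what is proved, stated in full; the proofs are below) =====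
def Claim_equal_generate_abstract_pattern_py : Prop := ∀ (patterns : List String) (vuln_type : String), Dom_generate_abstract_pattern_py patterns vuln_type → Spec_generate_abstract_pattern_py patterns vuln_type (generate_abstract_pattern_py patterns vuln_type)

-- ===== LEMMAS AND PROOFS =====

-- sorting pairs by their first component is sorting the (distinct) first components
lemma insertBy_map_fst {α β : Type} [LT α] [DecidableLT α] (g : α → α × β)
    (hg : ∀ a, (g a).1 = a) (x : α) (l : List α) :
    PySem.List.insertBy (fun a b => decide (a.1 < b.1)) (g x) (l.map g)
      = (PySem.List.insertBy (fun a b => decide (a < b)) x l).map g := by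
  induction l with
  | nil => simp [PySem.List.insertBy]
  | cons y ys ih =>
    simp only [List.map_cons, PySem.List.insertBy, hg]
    split_ifs <;> simp [ih]

lemma foldl_insertBy_map_fst {α β : Type} [LT α] [DecidableLT α] (g : α → α × β)
    (hg : ∀ a, (g a).1 = a) (l acc : List α) :
    (l.map g).foldl (fun acc x => PySem.List.insertBy (fun a b => decide (a.1 < b.1)) x acc) (acc.map g)
      = (l.foldl (fun acc x => PySem.List.insertBy (fun a b => decide (a < b)) x acc) acc).map g := by
  induction l generalizing acc with
  | nil => simp
  | cons y ys ih => simpa [insertBy_map_fst g hg] using ih (PySem.List.insertBy (fun a b => decide (a < b)) y acc)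

lemma sorted_map_fst {α β : Type} [LT α] [DecidableLT α] (g : α → α × β)
    (hg : ∀ a, (g a).1 = a) (l : List α) :
    PySem.List.sorted (l.map g) (fun q => q.1) false
      = (PySem.List.sorted l (fun x => x) false).map g := by
  rw [PySem.List.sorted_eq_foldl_insertBy, PySem.List.sorted_eq_foldl_insertBy]
  simpa using foldl_insertBy_map_fst g hg l []

-- the grouping dict of port A, over the parsed pairs
def pvDict (pairs : List (String × String)) : PySem.Dict String (List String) :=
  pairs.foldl (fun d q => d.modify q.1 [] (fun l => l ++ [q.2])) PySem.Dict.empty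

lemma pvDict_keys (pairs : List (String × String)) :
    (pvDict pairs).keys = PySem.Set.ofList (pairs.map (fun q => q.1)) := by
  simpa [pvDict] using
    PySem.Dict.keys_foldl_modify_key pairs (fun q => q.1) ([] : List String)
      (fun _ q l => l ++ [q.2]) PySem.Dict.empty

lemma pvDict_keys_nodup (pairs : List (String × String)) : (pvDict pairs).keys.Nodup := by
  rw [pvDict_keys]; exact PySem.Set.nodup_ofList _

lemma pvDict_getD (pairs : List (String × String)) (c : String) :
    (pvDict pairs).getD c [] = (pairs.filter (fun q => q.1 == c)).map (fun q => q.2) := by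
  simpa [pvDict] using PySem.Dict.getD_foldl_modify_append pairs PySem.Dict.empty c

-- ===== VERDICT (by name: the statement is the Claim_ definition above) =====
theorem generate_abstract_pattern_py_spec : Claim_equal_generate_abstract_pattern_py := by
  intro patterns vuln_type _
  unfold Spec_generate_abstract_pattern_py
  simp only [generate_abstract_pattern_py, generate_abstract_pattern_py_alt]
  rw [← List.foldl_map (f := pvParse)
      (g := fun (d : PySem.Dict String (List String)) (q : String × String) =>
        d.modify q.1 [] (fun l => l ++ [q.2]))]
  have hd : (patterns.map pvParse).foldl
      (fun (d : PySem.Dict String (List String)) (q : String × String) =>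
        d.modify q.1 [] (fun l => l ++ [q.2])) PySem.Dict.empty
      = pvDict (patterns.map pvParse) := rfl
  rw [hd,
    PySem.Dict.items_eq_map_keys (pvDict (patterns.map pvParse)) (pvDict_keys_nodup _) [],
    sorted_map_fst (fun k => (k, (pvDict (patterns.map pvParse)).getD k [])) (fun _ => rfl),
    PySem.List.foldl_append_singleton_eq_map, pvDict_keys]
  simp only [List.map_map, Function.comp_def, pvDict_getD, List.nil_append]
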